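-- pv_equiv track=rewrite | github.com/patrickstar275/Krabby-patty | src/poIO/PoBlockFilters.py | _filte_escapes_1
-- ===== SOURCE A (Python) =====
-- def _filte_escapes_1(segs, segs_map):
--     seg = ""
--     new_segs = []
--     new_segs_map = []
--     for idx in range(len(segs)):
--         if segs_map[idx] == 1:
--             str = segs[idx]
--             str_idx = 0
--             while str_idx < len(str):
--                 if str[str_idx] == '%':
--                     if len(seg) > 0:
--                         new_segs.append(seg)
--                         new_segs_map.append(1)
--                         seg = ""
--                     fpos = str_idx + 2
--                     for fidx in range(str_idx, len(str)):
--                         if str[fidx] == " ":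
--                             fpos = fidx + 1
--                             break
--                     new_segs.append(str[str_idx:fpos])
--                     new_segs_map.append(0)
--                     str_idx += fpos - str_idx
--                 else:
--                     seg += str[str_idx]
--                     if str_idx == len(str) - 1:
--                         new_segs.append(seg)
--                         new_segs_map.append(1)
--                         seg = ""
--                     str_idx += 1
--         else:
--             new_segs.append(segs[idx])
--             new_segs_map.append(segs_map[idx])
--     return new_segs, new_segs_map
-- ===== SOURCE B (Python) =====
-- def _filte_escapes_1(segs, segs_map):
--     new_segs = []
--     new_segs_map = []
--     for s, m in zip(segs, segs_map):
--         if m != 1: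
--             new_segs.append(s)
--             new_segs_map.append(m)
--             continue
--         i = 0
--         n = len(s)
--         while i < n:
--             if s[i] == '%':
--                 sp = s.find(' ', i)
--                 end = i + 2 if sp == -1 else sp + 1
--                 new_segs.append(s[i:end])
--                 new_segs_map.append(0)
--                 i = end
--             else:
--                 j = s.find('%', i)
--                 if j == -1:
--                     j = n
--                 new_segs.append(s[i:j])
--                 new_segs_map.append(1)
--                 i = j
--     return new_segs, new_segs_map
-- ===== Notes on version B (the rewrite author's own statement) =====
-- stated objective: alternative
-- what changed: B replaces A's per-character accumulation and inner space-scan loop with whole-run slicing: each plain run and each escape token is located with str.find and emitted as one slice, iterating over zip(segs, segs_map).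
import Mathlib
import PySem

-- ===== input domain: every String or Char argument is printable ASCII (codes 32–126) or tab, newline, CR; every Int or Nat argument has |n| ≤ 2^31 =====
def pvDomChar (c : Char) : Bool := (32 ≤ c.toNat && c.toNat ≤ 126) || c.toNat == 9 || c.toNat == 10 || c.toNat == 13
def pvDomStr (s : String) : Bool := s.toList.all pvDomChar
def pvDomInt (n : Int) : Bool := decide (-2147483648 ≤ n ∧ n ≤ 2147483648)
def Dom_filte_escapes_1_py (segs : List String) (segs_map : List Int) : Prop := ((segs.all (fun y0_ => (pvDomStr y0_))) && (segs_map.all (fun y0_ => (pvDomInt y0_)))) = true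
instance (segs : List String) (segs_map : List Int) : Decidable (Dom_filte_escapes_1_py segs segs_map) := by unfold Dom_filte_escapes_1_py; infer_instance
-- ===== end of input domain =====

-- B replaces A's char-by-char accumulation and inner space-scan with whole-run slicing located by str.find (alternative decomposition, same cost).

-- ===== PORT A =====
-- inner 'for fidx in range(str_idx, len(str)): if str[fidx] == " ": fpos = fidx + 1; break' (fpos starts as str_idx + 2)
def aFindLoop (cs : List Char) (fidx : Nat) (fpos : Nat) : Nat :=
  if h : fidx < cs.length then
    if cs[fidx] = ' ' then fidx + 1 else aFindLoop cs (fidx + 1) fpos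
  else fpos
termination_by cs.length - fidx

-- termination fact for aScan: the computed fpos is at least str_idx + 1
theorem aFindLoop_lt (cs : List Char) : ∀ f d, f < aFindLoop cs f d ∨ aFindLoop cs f d = d := by
  intro f d
  induction hd : cs.length - f using Nat.strong_induction_on generalizing f with
  | _ n ih =>
    unfold aFindLoop
    split
    · split
      · omega
      · rcases ih (cs.length - (f + 1)) (by omega) (f + 1) rfl with h | h
        · left; omega
        · right; exact h
    · right; rfl

theorem aFindLoop_succ_ge (cs : List Char) (i : Nat) : i + 1 ≤ aFindLoop cs i (i + 2) := by
  rcases aFindLoop_lt cs i (i + 2) with h | h <;> omega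

-- the 'while str_idx < len(str)' loop; state (seg, new_segs, new_segs_map)
def aScan (cs : List Char) (i : Nat) (seg : List Char) (ns : List String) (nm : List Int) :
    List Char × List String × List Int :=
  if h : i < cs.length then
    if cs[i] = '%' then
      let ns1 := if seg.length > 0 then ns ++ [String.ofList seg] else ns
      let nm1 := if seg.length > 0 then nm ++ [(1 : Int)] else nm
      let seg1 : List Char := if seg.length > 0 then [] else seg
      let fpos := aFindLoop cs i (i + 2)
      -- str[str_idx:fpos] on a clamped slice is drop/take; str_idx += fpos - str_idx
      aScan cs (i + (fpos - i)) seg1 (ns1 ++ [String.ofList ((cs.drop i).take (fpos - i))]) (nm1 ++ [(0 : Int)])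
    else
      let seg1 := seg ++ [cs[i]]
      if i = cs.length - 1 then
        aScan cs (i + 1) [] (ns ++ [String.ofList seg1]) (nm ++ [(1 : Int)])
      else
        aScan cs (i + 1) seg1 ns nm
  else (seg, ns, nm)
termination_by cs.length - i
decreasing_by
  · have := aFindLoop_succ_ge cs i; omega
  · omega
  · omega

-- 'for idx in range(len(segs))', threading seg across iterations exactly as A does
def aOuter (segs : List String) (segs_map : List Int) (idx : Nat) (seg : List Char)
    (ns : List String) (nm : List Int) : List String × List Int :=
  if h : idx < segs.length then
    if PySem.List.pyGetD segs_map (idx : Int) 0 = 1 then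
      let r := aScan (segs[idx].toList) 0 seg ns nm
      aOuter segs segs_map (idx + 1) r.1 r.2.1 r.2.2
    else
      aOuter segs segs_map (idx + 1) seg (ns ++ [segs[idx]]) (nm ++ [PySem.List.pyGetD segs_map (idx : Int) 0])
  else (ns, nm)
termination_by segs.length - idx

def filte_escapes_1_py (segs : List String) (segs_map : List Int) : List String × List Int :=
  aOuter segs segs_map 0 [] [] []

-- ===== PORT B =====
-- termination facts for bTok: a found index is ≥ the start, and carries the sought character
theorem findFrom_found (cs : List Char) (c : Char) (i : Nat) (hi : i ≤ cs.length)
    (h : PySem.Chars.findFrom cs [c] (i : Int) none ≠ -1) :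
    (i : Int) ≤ PySem.Chars.findFrom cs [c] (i : Int) none ∧
      cs[(PySem.Chars.findFrom cs [c] (i : Int) none).toNat]? = some c := by
  obtain ⟨h1, h2, _⟩ := PySem.Chars.findFrom_natCast_spec cs [c] i hi h
  refine ⟨h1, ?_⟩
  rcases h2 with ⟨t, ht⟩
  have : (cs.drop (PySem.Chars.findFrom cs [c] (i : Int) none).toNat).head? = some c := by
    rw [← ht]; rfl
  rwa [List.head?_drop] at this

-- the 'while i < n' loop of B: emit the escape token or the whole plain run, located with find
def bTok (cs : List Char) (i : Nat) (ns : List String) (nm : List Int) : List String × List Int :=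
  if h : i < cs.length then
    if cs[i] = '%' then
      let sp := PySem.Chars.findFrom cs [' '] (i : Int) none
      let e : Nat := if sp = -1 then i + 2 else (sp + 1).toNat
      bTok cs e (ns ++ [String.ofList ((cs.drop i).take (e - i))]) (nm ++ [(0 : Int)])
    else
      let j0 := PySem.Chars.findFrom cs ['%'] (i : Int) none
      let j : Nat := if j0 = -1 then cs.length else j0.toNat
      bTok cs j (ns ++ [String.ofList ((cs.drop i).take (j - i))]) (nm ++ [(1 : Int)])
  else (ns, nm)
termination_by cs.length - i
decreasing_by
  · split
    · omega
    · next hsp =>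
      have := (findFrom_found cs ' ' i (by omega) hsp).1
      omega
  · split
    · omega
    · next hj0 =>
      obtain ⟨h1, h2⟩ := findFrom_found cs '%' i (by omega) hj0
      have hne : (PySem.Chars.findFrom cs ['%'] (i : Int) none).toNat ≠ i := by
        intro he
        rw [he] at h2
        simp only [List.getElem?_eq_getElem h] at h2
        exact (by assumption : ¬ cs[i] = '%') (by injection h2)
      omega

def bStep (acc : List String × List Int) (p : String × Int) : List String × List Int :=
  if p.2 ≠ 1 then (acc.1 ++ [p.1], acc.2 ++ [p.2])
  else bTok p.1.toList 0 acc.1 acc.2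

def filte_escapes_1_py_alt (segs : List String) (segs_map : List Int) : List String × List Int :=
  (segs.zip segs_map).foldl bStep ([], [])

-- ===== PRECONDITION & SPEC =====
-- A indexes segs_map[idx] for every idx < len(segs): it raises IndexError iff segs_map is shorter than segs.
def Pre_filte_escapes_1_py (segs : List String) (segs_map : List Int) : Prop :=
  segs.length ≤ segs_map.length
instance (segs : List String) (segs_map : List Int) : Decidable (Pre_filte_escapes_1_py segs segs_map) := by
  unfold Pre_filte_escapes_1_py; infer_instance

def pvWitness_filte_escapes_1_py : List String × List Int := (["a%b c"], [1])

def Spec_filte_escapes_1_py (segs : List String) (segs_map : List Int) (out : List String × List Int) : Prop := out = filte_escapes_1_py_alt segs segs_map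
instance (segs : List String) (segs_map : List Int) (out : List String × List Int) : Decidable (Spec_filte_escapes_1_py segs segs_map out) := by unfold Spec_filte_escapes_1_py; infer_instance

-- ===== CLAIM (what is proved, stated in full; the proofs are below) =====
def Claim_equal_filte_escapes_1_py : Prop := ∀ (segs : List String) (segs_map : List Int), Dom_filte_escapes_1_py segs segs_map → Pre_filte_escapes_1_py segs segs_map → Spec_filte_escapes_1_py segs segs_map (filte_escapes_1_py segs segs_map)

-- ===== LEMMAS AND PROOFS =====

-- first index k ≥ i with cs[k] = c (proof-only characterisation shared by both ports' searches)
def firstIdx (cs : List Char) (c : Char) (i : Nat) : Option Nat :=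
  if h : i < cs.length then
    if cs[i] = c then some i else firstIdx cs c (i + 1)
  else none
termination_by cs.length - i

theorem firstIdx_some (cs : List Char) (c : Char) :
    ∀ i j, firstIdx cs c i = some j →
      i ≤ j ∧ cs[j]? = some c ∧ ∀ k, i ≤ k → k < j → cs[k]? ≠ some c := by
  intro i
  induction hd : cs.length - i using Nat.strong_induction_on generalizing i with
  | _ n ih =>
    intro j hj
    unfold firstIdx at hj
    split at hj
    · next h =>
      split at hj
      · next hc =>
        cases hj
        exact ⟨le_refl _, by simp [List.getElem?_eq_getElem h, hc], fun k hk1 hk2 => by omega⟩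
      · next hc =>
        obtain ⟨h1, h2, h3⟩ := ih (cs.length - (i+1)) (by omega) (i+1) rfl j hj
        refine ⟨by omega, h2, fun k hk1 hk2 => ?_⟩
        rcases Nat.eq_or_lt_of_le hk1 with rfl | hlt
        · simp [List.getElem?_eq_getElem h]; exact fun he => hc he
        · exact h3 k hlt hk2
    · exact absurd hj (by simp)

theorem firstIdx_none (cs : List Char) (c : Char) :
    ∀ i, firstIdx cs c i = none → ∀ k, i ≤ k → cs[k]? ≠ some c := by
  intro i
  induction hd : cs.length - i using Nat.strong_induction_on generalizing i with
  | _ n ih =>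
    intro hn k hk
    unfold firstIdx at hn
    split at hn
    · next h =>
      split at hn
      · simp at hn
      · next hc =>
        rcases Nat.eq_or_lt_of_le hk with rfl | hlt
        · simp [List.getElem?_eq_getElem h]; exact fun he => hc he
        · exact ih (cs.length - (i+1)) (by omega) (i+1) rfl hn k hlt
    · next h =>
      intro hcon
      obtain ⟨hlt, -⟩ := List.getElem?_eq_some_iff.mp hcon
      omega

theorem prefix_single (c : Char) (l : List Char) : [c] <+: l ↔ l.head? = some c := by
  constructor
  · rintro ⟨t, rfl⟩; rfl
  · intro h
    cases l with
    | nil => simp at h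
    | cons x xs => exact ⟨xs, by simp_all⟩

theorem prefix_single_drop (cs : List Char) (c : Char) (k : Nat) :
    [c] <+: cs.drop k ↔ cs[k]? = some c := by
  rw [prefix_single, List.head?_drop]

theorem findFrom_eq_firstIdx (cs : List Char) (c : Char) (i : Nat) (hi : i ≤ cs.length) :
    PySem.Chars.findFrom cs [c] (i : Int) none =
      (match firstIdx cs c i with | some j => (j : Int) | none => -1) := by
  cases hj : firstIdx cs c i with
  | none =>
    simp only []
    rw [PySem.Chars.findFrom_natCast_eq_neg_one_iff cs [c] i hi]
    intro hin
    obtain ⟨pre, suf, hps⟩ := hin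
    have hmem : c ∈ cs.drop i := by
      rw [← hps]; simp
    obtain ⟨k, hck⟩ := List.mem_iff_getElem?.mp hmem
    rw [List.getElem?_drop] at hck
    exact absurd hck (firstIdx_none cs c i hj (i + k) (by omega))
  | some j =>
    simp only []
    obtain ⟨hij, hjc, hmin⟩ := firstIdx_some cs c i j hj
    have hne : PySem.Chars.findFrom cs [c] (i : Int) none ≠ -1 := by
      rw [Ne, PySem.Chars.findFrom_natCast_eq_neg_one_iff cs [c] i hi]
      intro hno
      have hdd : cs.drop j = (cs.drop i).drop (j - i) := by
        rw [List.drop_drop]; congr 1; omega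
      exact hno (((prefix_single_drop cs c j).mpr hjc).isInfix.trans
        (by rw [hdd]; exact (List.drop_suffix _ _).isInfix))
    obtain ⟨h1, h2, h3⟩ := PySem.Chars.findFrom_natCast_spec cs [c] i hi hne
    set r := PySem.Chars.findFrom cs [c] (i : Int) none with hr
    have hr0 : 0 ≤ r := le_trans (by omega) h1
    have hrc : cs[r.toNat]? = some c := (prefix_single_drop cs c r.toNat).mp h2
    have hjr : j = r.toNat := by
      by_contra hne2
      rcases Nat.lt_or_ge j r.toNat with hlt | hge
      · exact h3 j (by omega) hlt ((prefix_single_drop cs c j).mpr hjc)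
      · have : r.toNat < j := by omega
        exact hmin r.toNat (by omega) this hrc
    omega

theorem aFindLoop_eq (cs : List Char) :
    ∀ f fp, aFindLoop cs f fp = (match firstIdx cs ' ' f with | some j => j + 1 | none => fp) := by
  intro f
  induction hd : cs.length - f using Nat.strong_induction_on generalizing f with
  | _ n ih =>
    intro fp
    unfold aFindLoop firstIdx
    split
    · split
      · rfl
      · exact ih (cs.length - (f + 1)) (by omega) (f + 1) rfl fp
    · rfl

-- absorbing a '%'-free run: A's char-by-char loop over [i, j) appends exactly the run slice
theorem aScan_run (cs : List Char) :
    ∀ d i j seg ns nm, j - i ≤ d → i < j → j ≤ cs.length →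
      (∀ k, i ≤ k → k < j → cs[k]? ≠ some '%') →
      aScan cs i seg ns nm =
        (if j = cs.length
          then ((([] : List Char)), ns ++ [String.ofList (seg ++ (cs.drop i).take (j - i))], nm ++ [(1 : Int)])
          else aScan cs j (seg ++ (cs.drop i).take (j - i)) ns nm) := by
  intro d
  induction d with
  | zero => intro i j seg ns nm h1 h2; omega
  | succ d ih =>
    intro i j seg ns nm h1 h2 h3 hnp
    have hi : i < cs.length := by omega
    have hci : ¬ cs[i] = '%' := by
      intro hc
      exact hnp i (le_refl _) h2 (by simp [List.getElem?_eq_getElem hi, hc])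
    have hdropi : cs.drop i = cs[i] :: cs.drop (i + 1) := List.drop_eq_getElem_cons hi
    rw [aScan]
    rw [dif_pos hi, if_neg hci]
    rcases Nat.eq_or_lt_of_le (Nat.succ_le_of_lt h2) with hij | hij
    · -- i + 1 = j
      have htake : (cs.drop i).take (j - i) = [cs[i]] := by
        rw [show j - i = 1 by omega, hdropi]
        rfl
      by_cases hj : j = cs.length
      · have hlast : i = cs.length - 1 := by omega
        rw [if_pos hlast, if_pos hj, htake]
        rw [aScan]
        rw [dif_neg (by omega)]
      · have hlast : ¬ i = cs.length - 1 := by omega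
        rw [if_neg hlast, if_neg hj, htake, ← hij]
    · -- i + 1 < j
      have hlast : ¬ i = cs.length - 1 := by omega
      rw [if_neg hlast]
      have := ih (i + 1) j (seg ++ [cs[i]]) ns nm (by omega) hij h3
        (fun k hk1 hk2 => hnp k (by omega) hk2)
      rw [this]
      have htake : seg ++ [cs[i]] ++ (cs.drop (i + 1)).take (j - (i + 1)) =
          seg ++ (cs.drop i).take (j - i) := by
        rw [hdropi]
        have hsub : j - i = (j - (i + 1)) + 1 := by omega
        rw [hsub, List.take_succ_cons, List.append_assoc]
        rfl
      rw [htake]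

theorem aScan_eq_bTok (cs : List Char) :
    ∀ d i seg ns nm, cs.length - i ≤ d → (seg = [] ∨ cs[i]? = some '%') →
      aScan cs i seg ns nm =
        ((([] : List Char)),
          bTok cs i (if seg = [] then ns else ns ++ [String.ofList seg])
            (if seg = [] then nm else nm ++ [(1 : Int)])) := by
  intro d
  induction d using Nat.strong_induction_on with
  | _ d ih =>
  intro i seg ns nm hd hdisj
  by_cases hi : i < cs.length
  case neg =>
    have hseg : seg = [] := by
      rcases hdisj with h | h
      · exact h
      · obtain ⟨hlt, -⟩ := List.getElem?_eq_some_iff.mp h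
        omega
    subst hseg
    rw [aScan, bTok, dif_neg hi, dif_neg hi]
    simp
  case pos =>
  by_cases hc : cs[i] = '%'
  · -- escape token branch in both programs
    rw [aScan, bTok, dif_pos hi, dif_pos hi, if_pos hc, if_pos hc]
    have hfa := aFindLoop_eq cs i (i + 2)
    have hff := findFrom_eq_firstIdx cs ' ' i (by omega)
    have hns1 : (if seg.length > 0 then ns ++ [String.ofList seg] else ns) =
        (if seg = [] then ns else ns ++ [String.ofList seg]) := by
      by_cases hseg : seg = [] <;> simp [hseg, List.length_pos_iff]
    have hnm1 : (if seg.length > 0 then nm ++ [(1 : Int)] else nm) =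
        (if seg = [] then nm else nm ++ [(1 : Int)]) := by
      by_cases hseg : seg = [] <;> simp [hseg, List.length_pos_iff]
    have hseg1 : (if seg.length > 0 then ([] : List Char) else seg) = [] := by
      by_cases hseg : seg = [] <;> simp [hseg, List.length_pos_iff]
    cases hsp : firstIdx cs ' ' i with
    | none =>
      rw [hsp] at hfa hff
      simp only [] at hfa hff
      rw [hfa, hff]
      dsimp only
      rw [hns1, hnm1, hseg1, if_pos (show (-1 : Int) = -1 from rfl),
        show i + (i + 2 - i) = i + 2 by omega]
      exact ih (d - 1) (by omega) (i + 2) [] _ _ (by omega) (Or.inl rfl)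
    | some j =>
      rw [hsp] at hfa hff
      simp only [] at hfa hff
      obtain ⟨hij, hjc, -⟩ := firstIdx_some cs ' ' i j hsp
      rw [hfa, hff]
      dsimp only
      rw [hns1, hnm1, hseg1, if_neg (show ¬ ((j : Int) = -1) by omega),
        show ((j : Int) + 1).toNat = j + 1 by omega,
        show i + (j + 1 - i) = j + 1 by omega]
      exact ih (d - 1) (by omega) (j + 1) [] _ _ (by omega) (Or.inl rfl)
  · -- plain run in both programs
    have hseg : seg = [] := by
      rcases hdisj with h | h
      · exact h
      · rw [List.getElem?_eq_getElem hi] at h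
        exact absurd (by injection h) hc
    subst hseg
    have hff := findFrom_eq_firstIdx cs '%' i (by omega)
    cases hj : firstIdx cs '%' i with
    | none =>
      rw [hj] at hff
      simp only [] at hff
      have hrun := aScan_run cs (cs.length - i) i cs.length [] ns nm (by omega) hi
        (le_refl _) (fun k hk1 hk2 => firstIdx_none cs '%' i hj k hk1)
      rw [if_pos rfl] at hrun
      rw [hrun]
      rw [bTok, dif_pos hi, if_neg hc, hff]
      dsimp only
      rw [if_pos (show (-1 : Int) = -1 from rfl)]
      rw [bTok, dif_neg (by omega : ¬ cs.length < cs.length)]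
      simp
    | some j =>
      rw [hj] at hff
      simp only [] at hff
      obtain ⟨hij, hjc, hmin⟩ := firstIdx_some cs '%' i j hj
      obtain ⟨hjlt, hjget⟩ := List.getElem?_eq_some_iff.mp hjc
      have hilt : i < j := by
        rcases Nat.eq_or_lt_of_le hij with rfl | h
        · exact absurd hjget hc
        · exact h
      have hrun := aScan_run cs (cs.length - i) i j [] ns nm (by omega) hilt (by omega)
        (fun k hk1 hk2 => hmin k hk1 hk2)
      rw [if_neg (by omega)] at hrun
      rw [hrun]
      have hrunne : ([] : List Char) ++ (cs.drop i).take (j - i) ≠ [] := by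
        simp only [List.nil_append]
        intro hnil
        have := congrArg List.length hnil
        simp [List.length_take, List.length_drop] at this
        omega
      have := ih (d - 1) (by omega) j (([] : List Char) ++ (cs.drop i).take (j - i)) ns nm
        (by omega) (Or.inr hjc)
      rw [this, if_neg hrunne, if_neg hrunne]
      conv_rhs => rw [bTok]
      rw [dif_pos hi, if_neg hc, hff]
      dsimp only
      rw [if_neg (show ¬ ((j : Int) = -1) by omega), show ((j : Int)).toNat = j by omega]
      simp

theorem aScan_zero (cs : List Char) (ns : List String) (nm : List Int) :
    aScan cs 0 [] ns nm = ((([] : List Char)), bTok cs 0 ns nm) := by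
  have := aScan_eq_bTok cs cs.length 0 [] ns nm (by omega) (Or.inl rfl)
  simpa using this

theorem aOuter_eq (segs : List String) (segs_map : List Int) (hlen : segs.length ≤ segs_map.length) :
    ∀ d idx ns nm, segs.length - idx ≤ d →
      aOuter segs segs_map idx [] ns nm =
        ((segs.drop idx).zip (segs_map.drop idx)).foldl bStep (ns, nm) := by
  intro d
  induction d with
  | zero =>
    intro idx ns nm hd
    rw [aOuter, dif_neg (by omega : ¬ idx < segs.length),
      List.drop_eq_nil_of_le (by omega : segs.length ≤ idx)]
    rfl
  | succ d ih =>
    intro idx ns nm hd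
    by_cases hidx : idx < segs.length
    case neg =>
      rw [aOuter, dif_neg hidx, List.drop_eq_nil_of_le (by omega : segs.length ≤ idx)]
      rfl
    case pos =>
      have hidx2 : idx < segs_map.length := by omega
      rw [aOuter, dif_pos hidx]
      rw [List.drop_eq_getElem_cons hidx, List.drop_eq_getElem_cons hidx2, List.zip_cons_cons,
        List.foldl_cons]
      have hget : PySem.List.pyGetD segs_map (idx : Int) 0 = segs_map[idx] := by
        rw [PySem.List.pyGetD_natCast, List.getD_eq_getElem segs_map 0 hidx2]
      by_cases hm : segs_map[idx] = 1
      · rw [if_pos (by rw [hget]; exact hm)]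
        dsimp only
        rw [aScan_zero]
        have hb : bStep (ns, nm) (segs[idx], segs_map[idx]) = bTok segs[idx].toList 0 ns nm := by
          rw [bStep, if_neg (by simpa using hm)]
        rw [← hb] at *
        rw [ih (idx + 1) (bStep (ns, nm) (segs[idx], segs_map[idx])).1
          (bStep (ns, nm) (segs[idx], segs_map[idx])).2 (by omega)]
      · rw [if_neg (by rw [hget]; exact hm)]
        rw [ih (idx + 1) (ns ++ [segs[idx]]) (nm ++ [PySem.List.pyGetD segs_map (idx : Int) 0]) (by omega)]
        rw [hget]
        congr 1
        rw [bStep, if_pos (by simpa using hm)]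

-- ===== VERDICT (by name: the statement is the Claim_ definition above) =====
theorem filte_escapes_1_py_spec : Claim_equal_filte_escapes_1_py := by
  intro segs segs_map _ hpre
  unfold Spec_filte_escapes_1_py filte_escapes_1_py filte_escapes_1_py_alt
  have := aOuter_eq segs segs_map hpre segs.length 0 [] [] (by omega)
  simpa using this
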